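-- pv_equiv track=rewrite | github.com/cyril69420/afl-sgm-analysis-tool | scripts/silver/silver_build_weather.py | _norm_text
-- ===== SOURCE A (Python) =====
-- from typing import Optional, List, Dict, Tuple
--
-- def _norm_text(s: Optional[str]) -> str:
--     if s is None:
--         return ""
--     s = str(s).strip().lower().replace("’", "'")
--     out = []
--     prev_space = False
--     for ch in s:
--         if ch.isalnum():
--             out.append(ch)
--             prev_space = False
--         else:
--             if not prev_space:
--                 out.append(" ")
--                 prev_space = True
--     return " ".join("".join(out).split())
-- ===== SOURCE B (Python) =====
-- def _norm_text(s):
--     if s is None: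
--         return ""
--     s = str(s).strip().lower().replace("\u2019", "'")
--     tokens = []
--     i, n = 0, len(s)
--     while i < n:
--         if s[i].isalnum():
--             j = i
--             while j < n and s[j].isalnum():
--                 j += 1
--             tokens.append(s[i:j])
--             i = j
--         else:
--             i += 1
--     return " ".join(tokens)
-- ===== Notes on version B (the rewrite author's own statement) =====
-- stated objective: alternative
-- what changed: Replaces the char-by-char loop with a prev_space flag followed by a split/rejoin pass by a single two-pointer scan that extracts maximal alphanumeric runs as tokens and joins them once with single spaces.
import Mathlib
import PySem

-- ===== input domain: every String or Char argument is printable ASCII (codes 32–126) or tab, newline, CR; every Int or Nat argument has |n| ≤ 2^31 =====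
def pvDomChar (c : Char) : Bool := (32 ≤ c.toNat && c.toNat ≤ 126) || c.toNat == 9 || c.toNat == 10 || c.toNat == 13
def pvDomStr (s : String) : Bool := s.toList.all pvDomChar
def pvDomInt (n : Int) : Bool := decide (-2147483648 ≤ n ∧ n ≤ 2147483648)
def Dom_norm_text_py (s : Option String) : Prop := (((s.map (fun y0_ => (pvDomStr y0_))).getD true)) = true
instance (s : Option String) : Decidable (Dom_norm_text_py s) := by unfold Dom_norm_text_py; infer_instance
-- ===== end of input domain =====

-- B replaces A's prev_space-flag character loop plus split/rejoin by one scan extracting maximal alphanumeric runs, joined once.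

-- ===== PORT A =====
def norm_text_py (s : Option String) : String :=
  match s with
  | none => ""
  | some v =>
    let s1 : String := PySem.Str.replace (PySem.Str.lower (PySem.Str.strip v)) "’" "'"
    let st := s1.toList.foldl (fun (st : List Char × Bool) ch =>
      if PySem.Chars.isalnum ch then (st.1 ++ [ch], false)
      else if st.2 = false then (st.1 ++ [' '], true) else st) ([], false)
    PySem.Str.join " " (PySem.Str.split₀ (String.ofList st.1))

-- ===== PORT B =====
-- the outer while of Source B as structural recursion; the inner run-collecting while is takeWhile/dropWhile
def pvRuns : List Char → List (List Char)
  | [] => []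
  | c :: cs =>
    if PySem.Chars.isalnum c then
      (c :: cs.takeWhile PySem.Chars.isalnum) :: pvRuns (cs.dropWhile PySem.Chars.isalnum)
    else pvRuns cs
termination_by cs => cs.length
decreasing_by
  · exact Nat.lt_succ_of_le (List.length_dropWhile_le _ _)
  · exact Nat.lt_succ_self _

def norm_text_py_alt (s : Option String) : String :=
  match s with
  | none => ""
  | some v =>
    let s1 : String := PySem.Str.replace (PySem.Str.lower (PySem.Str.strip v)) "’" "'"
    PySem.Str.join " " ((pvRuns s1.toList).map String.ofList)

-- ===== PRECONDITION & SPEC =====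
def Spec_norm_text_py (s : Option String) (out : String) : Prop := out = norm_text_py_alt s
instance (s : Option String) (out : String) : Decidable (Spec_norm_text_py s out) := by unfold Spec_norm_text_py; infer_instance

-- ===== CLAIM (what is proved, stated in full; the proofs are below) =====
def Claim_equal_norm_text_py : Prop := ∀ (s : Option String), Dom_norm_text_py s → Spec_norm_text_py s (norm_text_py s)

-- ===== LEMMAS AND PROOFS =====

-- the characters A's loop emits, as a recursive function of the input and the prev_space flag
def pvEmit : List Char → Bool → List Char
  | [], _ => []
  | c :: cs, prev =>
    if PySem.Chars.isalnum c then c :: pvEmit cs false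
    else if prev then pvEmit cs true else ' ' :: pvEmit cs true

theorem pvFoldl_emit (cs : List Char) (acc : List Char) (prev : Bool) :
    (cs.foldl (fun (st : List Char × Bool) ch =>
      if PySem.Chars.isalnum ch then (st.1 ++ [ch], false)
      else if st.2 = false then (st.1 ++ [' '], true) else st) (acc, prev)).1
    = acc ++ pvEmit cs prev := by
  induction cs generalizing acc prev with
  | nil => simp [pvEmit]
  | cons c cs ih =>
    by_cases h : PySem.Chars.isalnum c = true
    · simp [pvEmit, h, List.foldl_cons, ih]
    · cases prev <;> simp [pvEmit, h, List.foldl_cons, ih]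

theorem pvAlnum_not_space (c : Char) (h : PySem.Chars.isalnum c = true) :
    PySem.Chars.isspace c = false := by
  simp only [PySem.Chars.isalnum, PySem.Chars.isalpha, PySem.Chars.isupper,
        PySem.Chars.islower, PySem.Chars.isdigit, Char.le_def, Bool.or_eq_true,
        Bool.and_eq_true, decide_eq_true_eq, UInt32.le_iff_toNat_le, Char.toNat_val,
        show ('A').toNat = 65 from rfl, show ('Z').toNat = 90 from rfl,
        show ('a').toNat = 97 from rfl, show ('z').toNat = 122 from rfl,
        show ('0').toNat = 48 from rfl, show ('9').toNat = 57 from rfl] at h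
  simp only [PySem.Chars.isspace, Bool.or_eq_false_iff, Bool.and_eq_false_iff,
    decide_eq_false_iff_not]
  omega

-- the joint go-invariant: split₀ of the emitted chars yields exactly the maximal alnum runs
theorem pvGo_emit (cs : List Char) :
    (∀ (prev : Bool) (acc : List (List Char)),
       PySem.Chars.split₀.go (pvEmit cs prev) [] acc = acc.reverse ++ pvRuns cs) ∧
    (∀ (cur : List Char) (acc : List (List Char)), cur ≠ [] →
       PySem.Chars.split₀.go (pvEmit cs false) cur acc
       = acc.reverse ++ (cur.reverse ++ cs.takeWhile PySem.Chars.isalnum)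
           :: pvRuns (cs.dropWhile PySem.Chars.isalnum)) := by
  induction cs with
  | nil =>
    constructor
    · intro prev acc; simp [pvEmit, PySem.Chars.split₀.go, pvRuns]
    · intro cur acc hcur
      simp [pvEmit, PySem.Chars.split₀.go, pvRuns, List.isEmpty_iff, hcur]
  | cons c cs ih =>
    cases hh : PySem.Chars.isalnum c with
    | true =>
      constructor
      · intro prev acc
        simp only [pvEmit, hh, if_pos, PySem.Chars.split₀.go, pvAlnum_not_space c hh,
          Bool.false_eq_true, if_false]
        rw [ih.2 [c] acc (by simp)]
        simp [pvRuns, hh]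
      · intro cur acc hcur
        simp only [pvEmit, hh, if_pos, PySem.Chars.split₀.go, pvAlnum_not_space c hh,
          Bool.false_eq_true, if_false]
        rw [ih.2 (c :: cur) acc (by simp)]
        simp [hh]
    | false =>
      have hsp : PySem.Chars.isspace ' ' = true := by decide
      constructor
      · intro prev acc
        cases prev with
        | true =>
          simp only [pvEmit, hh, Bool.false_eq_true, if_false, if_pos]
          rw [ih.1 true acc]; simp [pvRuns, hh]
        | false =>
          simp only [pvEmit, hh, Bool.false_eq_true, if_false, PySem.Chars.split₀.go, hsp,
            List.isEmpty_nil, if_true]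
          rw [ih.1 true acc]; simp [pvRuns, hh]
      · intro cur acc hcur
        simp only [pvEmit, hh, Bool.false_eq_true, if_false, PySem.Chars.split₀.go, hsp,
          List.isEmpty_iff, hcur, if_true]
        rw [ih.1 true (cur.reverse :: acc)]
        simp [pvRuns, hh]

theorem pvSplit₀_emit (cs : List Char) :
    PySem.Chars.split₀ (pvEmit cs false) = pvRuns cs := by
  simpa using (pvGo_emit cs).1 false []

-- ===== VERDICT (by name: the statement is the Claim_ definition above) =====
theorem norm_text_py_spec : Claim_equal_norm_text_py := by
  intro s _hdom
  unfold Spec_norm_text_py norm_text_py norm_text_py_alt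
  cases s with
  | none => rfl
  | some v =>
    simp only [pvFoldl_emit, List.nil_append]
    apply congrArg (PySem.Str.join " ")
    apply List.map_injective_iff.mpr (fun _ _ h => String.toList_injective h)
    rw [PySem.Str.split₀_map_toList]
    simp only [String.toList_ofList, List.map_map, Function.comp_def, List.map_id']
    exact pvSplit₀_emit _
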